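-- pv_equiv track=rewrite | github.com/vdt040499/lexi_sign_vqa | preprocessing/step3_parse.py | absolute_to_local_indices
-- ===== SOURCE A (Python) =====
-- from typing import Sequence, List, Dict, Any, Tuple, Optional
--
-- def absolute_to_local_indices(detailed_images: Sequence[Sequence[str]]) -> List[List[int]]:
--     """Create a list of indices corresponding to each image group"""
--     output_indices = []
--     offset = 0
--     for group in detailed_images:
--         group_len = len(group)
--         output_indices.append(list(range(offset, offset + group_len)))
--         offset += group_len
--     return output_indices
-- ===== SOURCE B (Python) =====
-- def absolute_to_local_indices(detailed_images):
--     """Create a list of indices corresponding to each image group"""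
--     lens = [len(g) for g in detailed_images]
--     flat = list(range(sum(lens)))
--     starts = [0]
--     for L in lens:
--         starts.append(starts[-1] + L)
--     return [flat[a:b] for a, b in zip(starts, starts[1:])]
-- ===== Notes on version B (the rewrite author's own statement) =====
-- stated objective: alternative
-- what changed: Instead of constructing each group's range from a running offset, B materializes the full flat index space range(N) once, computes prefix-sum boundaries, and partitions flat by slicing between consecutive boundaries.
import Mathlib
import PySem

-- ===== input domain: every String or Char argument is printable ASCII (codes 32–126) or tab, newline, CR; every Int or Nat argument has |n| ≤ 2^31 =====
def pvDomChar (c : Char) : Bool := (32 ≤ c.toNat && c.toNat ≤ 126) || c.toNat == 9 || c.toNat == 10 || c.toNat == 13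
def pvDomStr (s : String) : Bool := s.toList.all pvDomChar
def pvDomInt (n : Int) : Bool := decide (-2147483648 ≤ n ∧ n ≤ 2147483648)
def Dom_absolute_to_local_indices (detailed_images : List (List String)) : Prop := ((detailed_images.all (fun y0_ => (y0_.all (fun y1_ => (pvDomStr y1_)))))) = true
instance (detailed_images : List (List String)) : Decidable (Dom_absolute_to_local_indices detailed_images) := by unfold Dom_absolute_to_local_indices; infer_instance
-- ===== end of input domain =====

-- B partitions a single materialized range(N) at prefix-sum boundaries instead of building each range from a running offset; alternative decomposition, same cost.
-- ===== PORT A =====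
def absolute_to_local_indices (detailed_images : List (List String)) : List (List Int) :=
  -- output_indices = []; offset = 0; for group in detailed_images: append(list(range(offset, offset+len(group)))); offset += len(group)
  (detailed_images.foldl
    (fun (acc : List (List Int) × Int) group =>
      let group_len : Int := (group.length : Int)
      (acc.1 ++ [PySem.List.pyRange acc.2 (acc.2 + group_len) 1], acc.2 + group_len))
    (([] : List (List Int)), (0 : Int))).1

-- ===== PORT B =====
def absolute_to_local_indices_alt (detailed_images : List (List String)) : List (List Int) :=
  let lens : List Int := detailed_images.map (fun g => (g.length : Int))
  let flat : List Int := PySem.List.pyRange 0 lens.sum 1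
  let starts : List Int :=
    lens.foldl (fun st L => st ++ [PySem.List.pyGetD st (-1) 0 + L]) [(0 : Int)]
  (starts.zip (PySem.List.slice starts (some 1) none)).map
    (fun p => PySem.List.slice flat (some p.1) (some p.2))

-- ===== PRECONDITION & SPEC =====
def Spec_absolute_to_local_indices (detailed_images : List (List String)) (out : List (List Int)) : Prop := out = absolute_to_local_indices_alt detailed_images
instance (detailed_images : List (List String)) (out : List (List Int)) : Decidable (Spec_absolute_to_local_indices detailed_images out) := by unfold Spec_absolute_to_local_indices; infer_instance

-- ===== CLAIM (what is proved, stated in full; the proofs are below) =====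
def Claim_equal_absolute_to_local_indices : Prop := ∀ (detailed_images : List (List String)), Dom_absolute_to_local_indices detailed_images → Spec_absolute_to_local_indices detailed_images (absolute_to_local_indices detailed_images)

-- ===== LEMMAS AND PROOFS =====


-- helper: the common mathematical shape (proof-only)
def goRanges : List Int → Int → List (List Int)
  | [], _ => []
  | L :: ls, off => PySem.List.pyRange off (off + L) 1 :: goRanges ls (off + L)

def scanStarts : Int → List Int → List Int
  | off, [] => [off]
  | off, L :: ls => off :: scanStarts (off + L) ls

def pairsOf : Int → List Int → List (Int × Int)
  | _, [] => []
  | off, L :: ls => (off, off + L) :: pairsOf (off + L) ls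

theorem pyGetD_neg_one_append (st : List Int) (x d : Int) :
    PySem.List.pyGetD (st ++ [x]) (-1) d = x := by
  simp [PySem.List.pyGetD, PySem.List.pyGet?, PySem.List.pyIdx?]

theorem foldl_starts (lens : List Int) : ∀ (st : List Int) (x : Int),
    lens.foldl (fun st L => st ++ [PySem.List.pyGetD st (-1) 0 + L]) (st ++ [x])
      = st ++ scanStarts x lens := by
  induction lens with
  | nil => intro st x; simp [scanStarts]
  | cons L ls ih =>
    intro st x
    simp only [List.foldl_cons, pyGetD_neg_one_append]
    have := ih (st ++ [x]) (x + L)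
    simp only [List.append_assoc] at this ⊢
    rw [this]
    simp [scanStarts]

theorem scan_head (off : Int) (ls : List Int) :
    scanStarts off ls = off :: (scanStarts off ls).drop 1 := by
  cases ls <;> rfl

theorem zip_scan (lens : List Int) : ∀ off,
    (scanStarts off lens).zip ((scanStarts off lens).drop 1) = pairsOf off lens := by
  induction lens with
  | nil => intro off; simp [scanStarts, pairsOf]
  | cons L ls ih =>
    intro off
    show ((off :: scanStarts (off + L) ls).zip (scanStarts (off + L) ls)) = _
    rw [scan_head (off + L) ls, List.zip_cons_cons, ← scan_head (off + L) ls, ih]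
    rfl

theorem slice_pyRange (N a b : Int) (ha : 0 ≤ a) (hab : a ≤ b) (hbN : b ≤ N) :
    PySem.List.slice (PySem.List.pyRange 0 N 1) (some a) (some b)
      = PySem.List.pyRange a b 1 := by
  rw [PySem.List.slice_toNat _ ha (le_trans ha hab),
      PySem.List.pyRange_one_append 0 a N ha (le_trans hab hbN),
      PySem.List.pyRange_one_append a b N hab hbN]
  have h1 : (PySem.List.pyRange 0 a 1).length = a.toNat := by
    simp [PySem.List.length_pyRange_one]
  have h2 : (PySem.List.pyRange a b 1).length = b.toNat - a.toNat := by
    simp [PySem.List.length_pyRange_one]; omega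
  rw [← h1, List.drop_left, h1, ← h2, List.take_left]

theorem map_pairs (N : Int) (lens : List Int) : ∀ off,
    (∀ L ∈ lens, 0 ≤ L) → 0 ≤ off → off + lens.sum ≤ N →
    (pairsOf off lens).map
        (fun p => PySem.List.slice (PySem.List.pyRange 0 N 1) (some p.1) (some p.2))
      = goRanges lens off := by
  induction lens with
  | nil => intro off _ _ _; rfl
  | cons L ls ih =>
    intro off hpos hoff hsum
    have hL : 0 ≤ L := hpos L (by simp)
    have hls : 0 ≤ ls.sum := List.sum_nonneg (fun x hx => hpos x (by simp [hx]))
    simp only [List.sum_cons] at hsum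
    simp only [pairsOf, goRanges, List.map_cons]
    rw [slice_pyRange N off (off + L) hoff (by omega) (by omega)]
    rw [ih (off + L) (fun x hx => hpos x (by simp [hx])) (by omega) (by omega)]

theorem foldl_A (d : List (List String)) : ∀ (acc : List (List Int)) (off : Int),
    (d.foldl
      (fun (acc : List (List Int) × Int) group =>
        let group_len : Int := (group.length : Int)
        (acc.1 ++ [PySem.List.pyRange acc.2 (acc.2 + group_len) 1], acc.2 + group_len))
      (acc, off)).1
      = acc ++ goRanges (d.map (fun g => (g.length : Int))) off := by
  induction d with
  | nil => intro acc off; simp [goRanges]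
  | cons g gs ih =>
    intro acc off
    simp only [List.foldl_cons, List.map_cons, goRanges]
    rw [ih]
    simp

-- ===== VERDICT (by name: the statement is the Claim_ definition above) =====
theorem absolute_to_local_indices_spec : Claim_equal_absolute_to_local_indices := by
  intro d _
  unfold Spec_absolute_to_local_indices absolute_to_local_indices absolute_to_local_indices_alt
  rw [foldl_A d [] 0, List.nil_append]
  have hst := foldl_starts (d.map (fun g => (g.length : Int))) [] 0
  simp only [List.nil_append] at hst
  dsimp only
  rw [hst, PySem.List.slice_from_one, ← List.drop_one, zip_scan]
  rw [map_pairs _ _ 0 (by intro L hL; simp at hL; obtain ⟨g, _, rfl⟩ := hL; positivity)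
        le_rfl (by simp)]
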